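-- pv_equiv track=rewrite | github.com/tobeannouncd/AdventOfCode | 2020/day10.py | part_one
-- ===== SOURCE A (Python) =====
-- def part_one(data):
--     s = sorted(data)
--     s = [0] + s + [s[-1]+3]
--     one_jolt, three_jolt = 0, 0
--     for a, b in zip(s, s[1:]):
--         if b-a == 1:
--             one_jolt += 1
--         elif b-a == 3:
--             three_jolt += 1
--     return one_jolt*three_jolt
-- ===== SOURCE B (Python) =====
-- def part_one(data):
--     vals = set(data)
--     lo = min(vals)
--     ones = (lo == 1) + sum(1 for v in vals if v + 1 in vals)
--     threes = 1 + (lo == 3) + sum(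
--         1 for v in vals
--         if v + 3 in vals and v + 1 not in vals and v + 2 not in vals)
--     return ones * threes
-- ===== Notes on version B (the rewrite author's own statement) =====
-- stated objective: alternative
-- what changed: B never sorts or scans adjacent pairs: it builds the set of adapter values and counts 1-gaps as values v with v+1 present, and 3-gaps as values v with v+3 present but v+1,v+2 absent, plus explicit terms for the 0-to-min and max-to-max+3 frame gaps.
import Mathlib
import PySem

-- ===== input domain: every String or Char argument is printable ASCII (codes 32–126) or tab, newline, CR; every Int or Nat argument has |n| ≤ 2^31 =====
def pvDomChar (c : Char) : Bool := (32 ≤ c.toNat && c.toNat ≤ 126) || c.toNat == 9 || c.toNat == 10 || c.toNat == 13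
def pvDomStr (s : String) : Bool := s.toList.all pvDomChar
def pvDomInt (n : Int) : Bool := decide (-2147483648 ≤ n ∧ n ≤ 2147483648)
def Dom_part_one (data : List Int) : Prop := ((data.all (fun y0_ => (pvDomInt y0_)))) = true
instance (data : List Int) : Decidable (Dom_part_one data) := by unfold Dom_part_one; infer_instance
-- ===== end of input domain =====

-- B drops A's sort-and-scan of adjacent pairs entirely: it counts gaps by set
-- membership (v+1 present; v+3 present with v+1,v+2 absent) plus the two frame
-- gaps 0→min and max→max+3; a different algorithm, same values.

-- ===== PORT A =====
-- s[-1] via PySem.List.pyGet?; on empty data Python raises IndexError (excluded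
-- by Pre_); the .getD 0 merely keeps the port total outside Pre_.
def part_one (data : List Int) : Int :=
  let sor := PySem.List.sorted data (fun x => x)
  let s : List Int := [0] ++ sor ++ [(PySem.List.pyGet? sor (-1)).getD 0 + 3]
  let p := (s.zip (s.drop 1)).foldl
    (fun (acc : Int × Int) ab =>
      if ab.2 - ab.1 == (1 : Int) then (acc.1 + 1, acc.2)
      else if ab.2 - ab.1 == (3 : Int) then (acc.1, acc.2 + 1)
      else acc) ((0 : Int), (0 : Int))
  p.1 * p.2

-- ===== PORT B =====
-- set(data) → PySem.Set.ofList; min(vals) raises ValueError on empty data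
-- (excluded by Pre_), the .getD 0 merely keeps the port total there;
-- sum(1 for v in vals if c) → List.countP.
def part_one_alt (data : List Int) : Int :=
  let vals : PySem.Set Int := PySem.Set.ofList data
  let lo : Int := (PySem.List.min? vals (fun x => x)).getD 0
  let ones : Int := (if lo = 1 then 1 else 0) +
    (vals.countP (fun v => PySem.Set.contains vals (v + 1)) : Int)
  let threes : Int := 1 + (if lo = 3 then 1 else 0) +
    (vals.countP (fun v => PySem.Set.contains vals (v + 3) &&
        !PySem.Set.contains vals (v + 1) && !PySem.Set.contains vals (v + 2)) : Int)
  ones * threes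

-- ===== PRECONDITION & SPEC =====
-- Pre_ excludes only the empty list, on which A raises IndexError at s[-1]
-- (and B raises ValueError at min(vals)).
def Pre_part_one (data : List Int) : Prop := data ≠ []
instance (data : List Int) : Decidable (Pre_part_one data) := by unfold Pre_part_one; infer_instance
def pvWitness_part_one : List Int := ([1, 4, 5, 6, 7, 10])
def Spec_part_one (data : List Int) (out : Int) : Prop := out = part_one_alt data
instance (data : List Int) (out : Int) : Decidable (Spec_part_one data out) := by unfold Spec_part_one; infer_instance

-- ===== CLAIM (what is proved, stated in full; the proofs are below) =====
def Claim_equal_part_one : Prop := ∀ (data : List Int), Dom_part_one data → Pre_part_one data → Spec_part_one data (part_one data)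

-- ===== LEMMAS AND PROOFS =====

-- adjacent differences of a list, as A's zip produces them
def pvDiffs (s : List Int) : List Int := (s.zip (s.drop 1)).map (fun ab => ab.2 - ab.1)

theorem pvDiffs_cons2 (a b : Int) (r : List Int) :
    pvDiffs (a :: b :: r) = (b - a) :: pvDiffs (b :: r) := by
  simp [pvDiffs]

theorem pvDiffs_singleton (a : Int) : pvDiffs [a] = [] := by simp [pvDiffs]

theorem pvDiffs_append_last (l : List Int) (hl : l ≠ []) (x : Int) :
    pvDiffs (l ++ [x]) = pvDiffs l ++ [x - l.getLast hl] := by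
  induction l with
  | nil => exact absurd rfl hl
  | cons a t ih =>
    cases t with
    | nil => simp [pvDiffs]
    | cons b r =>
      have h2 : (b :: r : List Int) ≠ [] := by simp
      rw [show (a :: b :: r) ++ [x] = a :: b :: (r ++ [x]) by simp,
          show (a :: b :: (r ++ [x])) = a :: ((b :: r) ++ [x]) by simp]
      rw [show a :: ((b :: r) ++ [x]) = a :: b :: (r ++ [x]) by simp] at *
      have := ih h2
      rw [show (a :: b :: (r ++ [x])) = (a :: (b :: r ++ [x])) by simp]
      rw [show (a :: (b :: r ++ [x])) = a :: b :: (r ++ [x]) by simp]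
      rw [show (a :: b :: (r ++ [x])) = a :: b :: (r ++ [x]) from rfl]
      calc pvDiffs (a :: b :: (r ++ [x]))
          = (b - a) :: pvDiffs (b :: (r ++ [x])) := pvDiffs_cons2 a b (r ++ [x])
        _ = (b - a) :: pvDiffs ((b :: r) ++ [x]) := by simp
        _ = (b - a) :: (pvDiffs (b :: r) ++ [x - (b :: r).getLast h2]) := by rw [this]
        _ = pvDiffs (a :: b :: r) ++ [x - (a :: b :: r).getLast hl] := by
            rw [pvDiffs_cons2]; simp [List.getLast_cons]

-- A's two-counter fold computes the counts of 1 and 3 among the differences.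
theorem pvFoldA_eq (l : List (Int × Int)) (x y : Int) :
    l.foldl
      (fun (acc : Int × Int) ab =>
        if ab.2 - ab.1 == (1 : Int) then (acc.1 + 1, acc.2)
        else if ab.2 - ab.1 == (3 : Int) then (acc.1, acc.2 + 1)
        else acc) (x, y)
    = (x + ((l.map (fun ab => ab.2 - ab.1)).count 1 : Int),
       y + ((l.map (fun ab => ab.2 - ab.1)).count 3 : Int)) := by
  induction l generalizing x y with
  | nil => simp
  | cons hd tl ih =>
    rw [List.foldl_cons]
    by_cases h1 : hd.2 - hd.1 = (1 : Int)
    · rw [if_pos (by simp [h1]), ih]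
      simp [h1, Prod.ext_iff]
      omega
    · by_cases h3 : hd.2 - hd.1 = (3 : Int)
      · rw [if_neg (by simp [h1]), if_pos (by simp [h3]), ih]
        simp [h3, Prod.ext_iff]
        omega
      · rw [if_neg (by simp [h1]), if_neg (by simp [h3]), ih]
        simp [List.count_cons, Prod.ext_iff]
        exact ⟨h1, h3⟩

-- a strictly sorted list whose head is the minimum of its members starts with it
theorem pvHeadMin (u : List Int) (a : Int) (hu : u.Pairwise (· < ·))
    (ha : a ∈ u) (hmin : ∀ y ∈ u, a ≤ y) : ∃ u', u = a :: u' := by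
  cases u with
  | nil => cases ha
  | cons c u' =>
    rcases List.mem_cons.mp ha with h | h
    · exact ⟨u', by rw [h]⟩
    · have hca : c < a := (List.pairwise_cons.mp hu).1 a h
      have : a ≤ c := hmin c (List.mem_cons_self)
      omega

-- CORE: for a ≤-sorted list l and a <-sorted list u with the same members,
-- where p decides "the successor of a within S is a+k", the number of adjacent
-- k-differences of l is the number of members of u satisfying p.
theorem pvCountDiffs (k : Int) (hk : 1 ≤ k) (S : Int → Prop) (p : Int → Bool)
    (hP1 : ∀ a b : Int, S a → S b → a < b → (∀ x : Int, a < x → x < b → ¬ S x) →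
      p a = decide (b - a = k))
    (hP2 : ∀ a : Int, S a → (∀ x : Int, a < x → ¬ S x) → p a = false) :
    ∀ (l u : List Int), l.Pairwise (· ≤ ·) → u.Pairwise (· < ·) →
      (∀ x, x ∈ l ↔ x ∈ u) → (∀ x ∈ u, S x) →
      (∀ x : Int, S x → x ∉ u → ∀ y ∈ u, x < y) →
      (pvDiffs l).count k = u.countP p := by
  intro l
  induction l with
  | nil =>
    intro u _ _ hmem _ _
    have : u = [] := by
      cases u with
      | nil => rfl
      | cons c u' => exact absurd ((hmem c).mpr List.mem_cons_self) (by simp)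
    simp [pvDiffs, this]
  | cons a t ih =>
    intro u hl hu hmem hS hlow
    cases t with
    | nil =>
      -- l = [a]; u must be [a]
      have hau : a ∈ u := (hmem a).mp List.mem_cons_self
      have hall : ∀ y ∈ u, y = a := by
        intro y hy
        have := (hmem y).mpr hy
        simpa using this
      have hueq : u = [a] := by
        cases u with
        | nil => cases hau
        | cons c u' =>
          have hc : c = a := hall c List.mem_cons_self
          cases u' with
          | nil => rw [hc]
          | cons d u'' =>
            have hd : d = a := hall d (by simp)
            have : c < d := (List.pairwise_cons.mp hu).1 d (by simp)
            omega
      have hpa : p a = false := by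
        apply hP2 a (hS a hau)
        intro x hx hSx
        have hxu : x ∈ u := by
          by_contra hnx
          have := hlow x hSx hnx a hau
          omega
        have := hall x hxu
        omega
      simp [pvDiffs_singleton, hueq, hpa]
    | cons b r =>
      have hab : a ≤ b := (List.pairwise_cons.mp hl).1 b List.mem_cons_self
      by_cases heq : a = b
      · -- duplicate head: the 0-difference is not counted (k ≥ 1), members unchanged
        rw [pvDiffs_cons2]
        have hmem' : ∀ x, x ∈ b :: r ↔ x ∈ u := by
          intro x
          rw [← hmem x]
          constructor
          · intro h; exact List.mem_cons_of_mem a h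
          · intro h
            rcases List.mem_cons.mp h with h | h
            · rw [h, heq]; exact List.mem_cons_self
            · exact h
        have := ih u (List.Pairwise.sublist (by simp) hl) hu hmem' hS hlow
        rw [List.count_cons, this]
        have : ¬ (b - a = k) := by omega
        simp [this]
      · -- a < b: a is the head of u; recurse on the tails
        have haltb : a < b := lt_of_le_of_ne hab heq
        have hau : a ∈ u := (hmem a).mp List.mem_cons_self
        have hamin : ∀ y ∈ u, a ≤ y := by
          intro y hy
          rcases List.mem_cons.mp ((hmem y).mpr hy) with h | h
          · omega
          · have := (List.pairwise_cons.mp hl).1 y h; omega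
        obtain ⟨u', hueq⟩ := pvHeadMin u a hu hau hamin
        subst hueq
        have hu' : u'.Pairwise (· < ·) := (List.pairwise_cons.mp hu).2
        have hagt : ∀ y ∈ u', a < y := (List.pairwise_cons.mp hu).1
        have hble : ∀ y ∈ b :: r, b ≤ y := by
          intro y hy
          rcases List.mem_cons.mp hy with h | h
          · omega
          · have := (List.pairwise_cons.mp (List.pairwise_cons.mp hl).2).1 y h; omega
        have hmem' : ∀ x, x ∈ b :: r ↔ x ∈ u' := by
          intro x
          constructor
          · intro h
            have hx : x ∈ a :: u' := (hmem x).mp (List.mem_cons_of_mem a h)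
            rcases List.mem_cons.mp hx with h' | h'
            · have := hble x h; omega
            · exact h'
          · intro h
            have hx : x ∈ a :: b :: r := (hmem x).mpr (List.mem_cons_of_mem a h)
            rcases List.mem_cons.mp hx with h' | h'
            · have := hagt x h; omega
            · exact h'
        have hS' : ∀ x ∈ u', S x := fun x hx => hS x (List.mem_cons_of_mem a hx)
        have hlow' : ∀ x : Int, S x → x ∉ u' → ∀ y ∈ u', x < y := by
          intro x hSx hnx y hy
          by_cases hxu : x ∈ a :: u'
          · rcases List.mem_cons.mp hxu with h | h
            · rw [h]; exact hagt y hy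
            · exact absurd h hnx
          · exact hlow x hSx hxu y (List.mem_cons_of_mem a hy)
        -- the head contributes (b - a = k) on both sides
        have hbS : S b := hS b ((hmem b).mp (by simp))
        have hgap : ∀ x : Int, a < x → x < b → ¬ S x := by
          intro x hax hxb hSx
          by_cases hxu : x ∈ a :: u'
          · have : x ∈ a :: b :: r := (hmem x).mpr hxu
            rcases List.mem_cons.mp this with h | h
            · omega
            · have := hble x h; omega
          · have := hlow x hSx hxu a List.mem_cons_self; omega
        have hpa : p a = decide (b - a = k) := hP1 a b (hS a hau) hbS haltb hgap
        rw [pvDiffs_cons2, List.count_cons, List.countP_cons, hpa,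
            ih u' (List.pairwise_cons.mp hl).2 hu' hmem' hS' hlow']
        simp

-- instantiation of pvCountDiffs for the 1-gap predicate
theorem pvC1 (data : List Int) :
    ((pvDiffs (PySem.List.sorted data (fun x => x))).count 1)
      = (PySem.Set.ofList data).countP
          (fun v => PySem.Set.contains (PySem.Set.ofList data) (v + 1)) := by
  have hperm : (PySem.List.sorted (PySem.Set.ofList data) (fun x => x)).Perm
      (PySem.Set.ofList data) := PySem.List.sorted_perm _ _ _
  rw [← hperm.countP_eq]
  apply pvCountDiffs 1 (by norm_num) (fun x => x ∈ data)
  · intro a b _ hb hab hgap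
    rw [Bool.eq_iff_iff, PySem.Set.contains_iff, PySem.Set.mem_ofList, decide_eq_true_iff]
    constructor
    · intro h
      by_contra hne
      exact hgap (a + 1) (by omega) (by omega) h
    · intro h
      have : b = a + 1 := by omega
      rw [← this]; exact hb
  · intro a _ hmax
    rw [← Bool.not_eq_true, PySem.Set.contains_iff, PySem.Set.mem_ofList]
    exact hmax (a + 1) (by omega)
  · simpa using PySem.List.sorted_pairwise data (fun x => x)
  · exact PySem.List.sorted_ofList_pairwise_lt data
  · intro x
    rw [PySem.List.mem_sorted, PySem.List.mem_sorted, PySem.Set.mem_ofList]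
  · intro x hx
    rw [PySem.List.mem_sorted, PySem.Set.mem_ofList] at hx; exact hx
  · intro x hx hnx
    rw [PySem.List.mem_sorted, PySem.Set.mem_ofList] at hnx
    exact absurd hx hnx

-- instantiation of pvCountDiffs for the 3-gap predicate
theorem pvC3 (data : List Int) :
    ((pvDiffs (PySem.List.sorted data (fun x => x))).count 3)
      = (PySem.Set.ofList data).countP
          (fun v => PySem.Set.contains (PySem.Set.ofList data) (v + 3) &&
            !PySem.Set.contains (PySem.Set.ofList data) (v + 1) &&
            !PySem.Set.contains (PySem.Set.ofList data) (v + 2)) := by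
  have hperm : (PySem.List.sorted (PySem.Set.ofList data) (fun x => x)).Perm
      (PySem.Set.ofList data) := PySem.List.sorted_perm _ _ _
  rw [← hperm.countP_eq]
  apply pvCountDiffs 3 (by norm_num) (fun x => x ∈ data)
  · intro a b _ hb hab hgap
    rw [Bool.eq_iff_iff]
    simp only [Bool.and_eq_true, Bool.not_eq_true', ← Bool.not_eq_true,
      PySem.Set.contains_iff, PySem.Set.mem_ofList, decide_eq_true_iff]
    constructor
    · rintro ⟨⟨h3, h1⟩, h2⟩
      have hble : b ≤ a + 3 := by
        by_contra hgt
        exact hgap (a + 3) (by omega) (by omega) h3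
      have hb1 : b ≠ a + 1 := fun h => h1 (h ▸ hb)
      have hb2 : b ≠ a + 2 := fun h => h2 (h ▸ hb)
      omega
    · intro h
      have hb3 : b = a + 3 := by omega
      refine ⟨⟨hb3 ▸ hb, ?_⟩, ?_⟩
      · exact fun h1 => hgap (a + 1) (by omega) (by omega) h1
      · exact fun h2 => hgap (a + 2) (by omega) (by omega) h2
  · intro a _ hmax
    have h3 : a + 3 ∉ data := hmax (a + 3) (by omega)
    simp [PySem.Set.mem_ofList, h3]
  · simpa using PySem.List.sorted_pairwise data (fun x => x)
  · exact PySem.List.sorted_ofList_pairwise_lt data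
  · intro x
    rw [PySem.List.mem_sorted, PySem.List.mem_sorted, PySem.Set.mem_ofList]
  · intro x hx
    rw [PySem.List.mem_sorted, PySem.Set.mem_ofList] at hx; exact hx
  · intro x hx hnx
    rw [PySem.List.mem_sorted, PySem.Set.mem_ofList] at hnx
    exact absurd hx hnx

-- B's lo = min(set(data)) is the head of sorted(data)
theorem pvLo (data : List Int) (m : Int) (rest : List Int)
    (hsor : PySem.List.sorted data (fun x => x) = m :: rest) :
    (PySem.List.min? (PySem.Set.ofList data) (fun x => x)).getD 0 = m := by
  have hmd : m ∈ data := by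
    have : m ∈ PySem.List.sorted data (fun x => x) := by rw [hsor]; exact List.mem_cons_self
    rwa [PySem.List.mem_sorted] at this
  have hvalsne : (PySem.Set.ofList data) ≠ [] :=
    List.ne_nil_of_mem ((PySem.Set.mem_ofList data m).mpr hmd)
  cases hmin : PySem.List.min? (PySem.Set.ofList data) (fun x => x) with
  | none => exact absurd ((PySem.List.min?_eq_none_iff _ _).mp hmin) hvalsne
  | some m0 =>
    have hm0d : m0 ∈ data := (PySem.Set.mem_ofList data m0).mp (PySem.List.min?_mem hmin)
    have h1 : m0 ≤ m := PySem.List.min?_isMin hmin m ((PySem.Set.mem_ofList data m).mpr hmd)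
    have h2 : m ≤ m0 := PySem.List.key_head_sorted_le data (fun x => x) hsor m0 hm0d
    simp [le_antisymm h1 h2]

-- the zip-map in A's fold is pvDiffs
theorem pvDiffs_eq (s : List Int) :
    (s.zip (s.drop 1)).map (fun ab => ab.2 - ab.1) = pvDiffs s := rfl

-- differences of the framed list [0] + L + [x]
theorem pvFrame (L : List Int) (hL : L ≠ []) (m : Int) (rest : List Int)
    (hLr : L = m :: rest) (x : Int) :
    pvDiffs ([0] ++ L ++ [x]) = (m - 0) :: (pvDiffs L ++ [x - L.getLast hL]) := by
  subst hLr
  have h1 : (([0] ++ (m :: rest) ++ [x]) : List Int) = 0 :: m :: (rest ++ [x]) := by simp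
  rw [h1, pvDiffs_cons2]
  have h2 : m :: (rest ++ [x]) = (m :: rest) ++ [x] := by simp
  rw [h2, pvDiffs_append_last _ hL]

-- ===== VERDICT (by name: the statement is the Claim_ definition above) =====
theorem part_one_spec : Claim_equal_part_one := by
  intro data _ hpre
  unfold Spec_part_one part_one part_one_alt
  have hsorne : PySem.List.sorted data (fun x => x) ≠ [] := by
    rw [Ne, PySem.List.sorted_eq_nil_iff]; exact hpre
  obtain ⟨m, rest, hsor⟩ : ∃ m rest, PySem.List.sorted data (fun x => x) = m :: rest := by
    cases h : PySem.List.sorted data (fun x => x) with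
    | nil => exact absurd h hsorne
    | cons m rest => exact ⟨m, rest, rfl⟩
  have hget : (PySem.List.pyGet? (PySem.List.sorted data (fun x => x)) (-1)).getD 0
      = (PySem.List.sorted data (fun x => x)).getLast hsorne := by
    rw [PySem.List.pyGet?_neg_one, List.getLast?_eq_some_getLast hsorne]; rfl
  have c13 : ([3] : List Int).count 1 = 0 := by decide
  have c33 : ([3] : List Int).count 3 = 1 := by decide
  simp only [pvFoldA_eq, pvDiffs_eq, hget,
    pvFrame (PySem.List.sorted data (fun x => x)) hsorne m rest hsor,
    add_sub_cancel_left, List.count_cons, List.count_append,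
    pvC1, pvC3, pvLo data m rest hsor, c13, c33, sub_zero]
  simp only [beq_iff_eq]
  split_ifs <;> push_cast <;> ring
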